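-- pv_equiv track=rewrite | github.com/shivpandey02/CodePractice | vipul_codechef/COMPRESSVD.py | compress_video
-- ===== SOURCE A (Python) =====
-- def compress_video(l,k):
--     j=0
--     while(j<len(l)-1):
--         if l[j] == l[j+1]:
--             l.remove(l[0])
--         else:
--             j+=1
--     return len(l)
-- ===== SOURCE B (Python) =====
-- def compress_video(l, k):
--     # Single pass: count run boundaries (element != previous). Does not mutate l
--     # (A shrinks l in place; equivalence is about the return value).
--     count = 0
--     prev = None
--     for x in l:
--         if prev is None or x != prev:
--             count += 1
--         prev = x
--     return count
-- ===== Notes on version B (the rewrite author's own statement) =====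
-- stated objective: faster
-- what changed: Replaced the quadratic while-loop that repeatedly removes the list head on each equal adjacent pair with a single left-to-right pass counting positions where the element differs from its predecessor (number of runs).
import Mathlib
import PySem

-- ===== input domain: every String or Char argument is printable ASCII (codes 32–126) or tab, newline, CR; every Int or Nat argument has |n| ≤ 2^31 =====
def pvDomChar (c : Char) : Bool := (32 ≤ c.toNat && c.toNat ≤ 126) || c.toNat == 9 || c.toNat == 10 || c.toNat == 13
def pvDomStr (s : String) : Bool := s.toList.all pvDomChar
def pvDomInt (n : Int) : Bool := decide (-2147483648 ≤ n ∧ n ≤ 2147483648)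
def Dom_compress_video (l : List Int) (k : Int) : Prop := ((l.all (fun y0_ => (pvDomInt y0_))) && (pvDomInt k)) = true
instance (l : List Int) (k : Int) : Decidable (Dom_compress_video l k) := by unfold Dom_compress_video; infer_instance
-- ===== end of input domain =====

-- B replaces A's quadratic remove-from-front while-loop by a single pass counting
-- run boundaries; A mutates l in place (B does not) — the equivalence proved here is
-- about the return value only.

-- ===== PORT A =====
-- the while(j < len(l)-1) loop; l.remove(l[0]) removes the first occurrence of
-- l[0], which is the head itself (PySem.List.remove?_cons_self); in the branch
-- l is nonempty since j+1 < len(l), so the [] case is unreachable.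
def compressLoopA (l : List Int) (j : Nat) : Int :=
  if h : (j : Int) < (l.length : Int) - 1 then
    if (PySem.List.pyGet? l (j : Int)).getD 0 = (PySem.List.pyGet? l ((j : Int) + 1)).getD 0 then
      match l with
      | [] => 0  -- unreachable
      | a :: t => compressLoopA ((PySem.List.remove? (a :: t) a).getD t) j
    else compressLoopA l (j + 1)
  else (l.length : Int)
termination_by l.length - j
decreasing_by
  · simp only [PySem.List.remove?_cons_self, Option.getD_some]
    simp only [List.length_cons] at h ⊢
    omega
  · omega

def compress_video (l : List Int) (k : Int) : Int := compressLoopA l 0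

-- ===== PORT B =====
-- one fold over l carrying (count, prev); prev = none plays Python's None.
def compress_video_alt (l : List Int) (k : Int) : Int :=
  (l.foldl
    (fun (s : Int × Option Int) x =>
      (if s.2 = none ∨ x ≠ s.2.getD 0 then s.1 + 1 else s.1, some x))
    (0, none)).1

-- ===== PRECONDITION & SPEC =====
def Spec_compress_video (l : List Int) (k : Int) (out : Int) : Prop := out = compress_video_alt l k
instance (l : List Int) (k : Int) (out : Int) : Decidable (Spec_compress_video l k out) := by unfold Spec_compress_video; infer_instance

-- ===== CLAIM (what is proved, stated in full; the proofs are below) =====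
def Claim_equal_compress_video : Prop := ∀ (l : List Int) (k : Int), Dom_compress_video l k → Spec_compress_video l k (compress_video l k)

-- ===== LEMMAS AND PROOFS =====

-- number of equal adjacent pairs
def eqPairs : List Int → Nat
  | a :: b :: t => (if a = b then 1 else 0) + eqPairs (b :: t)
  | _ => 0

theorem eqPairs_short (l : List Int) (h : l.length ≤ 1) : eqPairs l = 0 := by
  match l, h with
  | [], _ => rfl
  | [a], _ => rfl

theorem eqPairs_drop (l : List Int) (j : Nat) (h : j + 1 < l.length) :
    eqPairs (l.drop j) =
      (if l[j] = l[j + 1] then 1 else 0) + eqPairs (l.drop (j + 1)) := by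
  have h1 : l.drop j = l[j] :: l.drop (j + 1) :=
    List.drop_eq_getElem_cons (by omega)
  have h2 : l.drop (j + 1) = l[j + 1] :: l.drop (j + 2) :=
    List.drop_eq_getElem_cons (by omega)
  rw [h1, h2, eqPairs]

-- A's loop computes len(l) minus the equal adjacent pairs at positions ≥ j
theorem compressLoopA_eq (l : List Int) (j : Nat) :
    compressLoopA l j = (l.length : Int) - (eqPairs (l.drop j) : Int) := by
  fun_induction compressLoopA l j
  case case1 j h heq =>
    simp only [List.length_nil, Nat.cast_zero] at h
    omega
  case case2 j a t h heq ih =>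
    rw [ih]
    simp only [PySem.List.remove?_cons_self, Option.getD_some]
    have hlen : j + 1 < (a :: t).length := by
      simp only [List.length_cons] at h ⊢
      omega
    have hget : (a :: t)[j] = (a :: t)[j + 1] := by
      have e1 := PySem.List.pyGet?_ofNat (xs := a :: t) (n := j) (by omega)
      have e2 := PySem.List.pyGet?_ofNat (xs := a :: t) (n := j + 1) (by omega)
      rw [e1] at heq
      rw [show ((j : Int) + 1) = ((j + 1 : Nat) : Int) by push_cast; ring, e2] at heq
      simpa using heq
    have hd : eqPairs ((a :: t).drop j) = 1 + eqPairs (t.drop j) := by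
      rw [eqPairs_drop _ _ hlen, if_pos hget]
      simp
    simp only [List.length_cons, hd]
    push_cast
    omega
  case case3 l j h heq ih =>
    rw [ih]
    have hlen : j + 1 < l.length := by omega
    have hget : l[j] ≠ l[j + 1] := by
      have e1 := PySem.List.pyGet?_ofNat (xs := l) (n := j) (by omega)
      have e2 := PySem.List.pyGet?_ofNat (xs := l) (n := j + 1) (by omega)
      rw [e1, show ((j : Int) + 1) = ((j + 1 : Nat) : Int) by push_cast; ring, e2] at heq
      simpa using heq
    rw [eqPairs_drop _ _ hlen, if_neg hget]
    simp
  case case4 l j h =>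
    rw [eqPairs_short (l.drop j) (by simp; omega)]
    simp

-- B's fold from state (c, some p) counts runs of p :: t beyond the first
theorem altFold (t : List Int) (c : Int) (p : Int) :
    (t.foldl
      (fun (s : Int × Option Int) x =>
        (if s.2 = none ∨ x ≠ s.2.getD 0 then s.1 + 1 else s.1, some x))
      (c, some p)).1 = c + (t.length : Int) - (eqPairs (p :: t) : Int) := by
  induction t generalizing c p with
  | nil => simp [eqPairs]
  | cons x t ih =>
    by_cases hx : x = p
    · subst hx
      simp only [List.foldl_cons]
      rw [if_neg (by simp), ih]
      rw [show eqPairs (x :: x :: t) = 1 + eqPairs (x :: t) by rw [eqPairs]; simp]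
      simp only [List.length_cons]; push_cast; omega
    · simp only [List.foldl_cons]
      rw [if_pos (by simp [hx]), ih]
      rw [show eqPairs (p :: x :: t) = eqPairs (x :: t) by
        rw [eqPairs]; simp [Ne.symm hx]]
      simp only [List.length_cons]; push_cast; omega

theorem alt_eq (l : List Int) (k : Int) :
    compress_video_alt l k = (l.length : Int) - (eqPairs l : Int) := by
  cases l with
  | nil => simp [compress_video_alt, eqPairs]
  | cons x t =>
    unfold compress_video_alt
    simp only [List.foldl_cons]
    rw [if_pos (by simp), altFold]
    simp only [List.length_cons]
    push_cast; ring

-- ===== VERDICT (by name: the statement is the Claim_ definition above) =====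
theorem compress_video_spec : Claim_equal_compress_video := by
  intro l k _
  show compress_video l k = compress_video_alt l k
  rw [compress_video, compressLoopA_eq, alt_eq]
  simp
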